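-- pv_equiv track=rewrite | github.com/cole-wilson/benchmarks | parser.py | split_lines_to_benchmarks
-- ===== SOURCE A (Python) =====
-- def split_lines_to_benchmarks(data):
--     raw_benchmarks = []
--     benchmark_buffer = []
--     for line in data:
--         if line.startswith("1 "):
--             raw_benchmarks.append(benchmark_buffer)
--             benchmark_buffer = []
--         benchmark_buffer.append(line)
--     del raw_benchmarks[0]
--     return raw_benchmarks
-- ===== SOURCE B (Python) =====
-- def split_lines_to_benchmarks(data):
--     lst = list(data)
--     marks = [i for i, line in enumerate(lst) if line.startswith("1 ")]
--     return [lst[a:b] for a, b in zip(marks, marks[1:])]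
-- ===== Notes on version B (the rewrite author's own statement) =====
-- stated objective: alternative
-- what changed: Replaces the stateful buffer-accumulating loop (append-to-current-group, flush on marker, delete the leading preamble group) by a single index scan that collects marker positions and then slices the list between consecutive markers.
import Mathlib
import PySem

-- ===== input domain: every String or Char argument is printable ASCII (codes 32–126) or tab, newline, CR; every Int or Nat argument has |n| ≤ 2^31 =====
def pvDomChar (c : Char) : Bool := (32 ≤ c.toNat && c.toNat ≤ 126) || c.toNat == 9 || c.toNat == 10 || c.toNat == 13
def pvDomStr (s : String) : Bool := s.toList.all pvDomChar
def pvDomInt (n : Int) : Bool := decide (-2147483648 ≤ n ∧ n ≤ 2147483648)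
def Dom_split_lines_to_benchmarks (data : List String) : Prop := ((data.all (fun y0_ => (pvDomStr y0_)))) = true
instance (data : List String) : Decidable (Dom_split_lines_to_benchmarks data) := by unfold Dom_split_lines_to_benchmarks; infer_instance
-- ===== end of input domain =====

-- B replaces A's stateful buffer loop (flush on marker, delete leading preamble group) by one
-- marker-index scan followed by slicing between consecutive marker positions (objective: alternative).

-- ===== PORT A =====
-- for-loop with state (raw_benchmarks, benchmark_buffer); 'del raw_benchmarks[0]' becomes .tail,
-- Pre_ guarantees the list is nonempty there (Python raises IndexError on []).
def split_lines_to_benchmarks (data : List String) : List (List String) :=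
  let st := data.foldl
    (fun (st : List (List String) × List String) line =>
      let st := if PySem.Str.startswith line "1 " then (st.1 ++ [st.2], ([] : List String)) else st
      (st.1, st.2 ++ [line]))
    ([], [])
  st.1.tail

-- ===== PORT B =====
def split_lines_to_benchmarks_alt (data : List String) : List (List String) :=
  let lst := data
  let marks := (PySem.List.enumerate lst).filterMap
    (fun p => if PySem.Str.startswith p.2 "1 " then some p.1 else none)
  (marks.zip marks.tail).map (fun p => PySem.List.slice lst (some p.1) (some p.2))

-- ===== PRECONDITION & SPEC =====
-- Pre_ excludes exactly the inputs with no line starting with "1 ": there A's 'del raw_benchmarks[0]'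
-- raises IndexError on the empty list.
def Pre_split_lines_to_benchmarks (data : List String) : Prop :=
  ∃ l ∈ data, PySem.Str.startswith l "1 " = true
instance (data : List String) : Decidable (Pre_split_lines_to_benchmarks data) := by
  unfold Pre_split_lines_to_benchmarks; infer_instance
def pvWitness_split_lines_to_benchmarks : List String := ["1 a", "x", "1 b"]

def Spec_split_lines_to_benchmarks (data : List String) (out : List (List String)) : Prop :=
  out = split_lines_to_benchmarks_alt data
instance (data : List String) (out : List (List String)) : Decidable (Spec_split_lines_to_benchmarks data out) := by
  unfold Spec_split_lines_to_benchmarks; infer_instance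

-- ===== CLAIM (what is proved, stated in full; the proofs are below) =====
def Claim_equal_split_lines_to_benchmarks : Prop := ∀ (data : List String), Dom_split_lines_to_benchmarks data → Pre_split_lines_to_benchmarks data → Spec_split_lines_to_benchmarks data (split_lines_to_benchmarks data)

-- ===== LEMMAS AND PROOFS =====

-- A's loop body, named for the proofs
def pvStep (st : List (List String) × List String) (line : String) : List (List String) × List String :=
  let st := if PySem.Str.startswith line "1 " then (st.1 ++ [st.2], ([] : List String)) else st
  (st.1, st.2 ++ [line])

-- Nat positions of the marker lines, counting from s
def pvMkFrom (xs : List String) (s : Nat) : List Nat :=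
  match xs with
  | [] => []
  | l :: ls => (if PySem.Str.startswith l "1 " then [s] else []) ++ pvMkFrom ls (s + 1)

-- the slices of xs between consecutive marker positions
def pvChunks (xs : List String) (mk : List Nat) : List (List String) :=
  (mk.zip mk.tail).map (fun p => (xs.drop p.1).take (p.2 - p.1))

lemma pvHeadI_append (l : List Nat) (e : Nat) (h : l ≠ []) : (l ++ [e]).headI = l.headI := by
  cases l with
  | nil => exact absurd rfl h
  | cons a t => simp

lemma pvHeadI_mem (l : List Nat) (h : l ≠ []) : l.headI ∈ l := by
  cases l with
  | nil => exact absurd rfl h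
  | cons a t => simp

lemma pvGetLastI_concat (l : List Nat) (e : Nat) : (l ++ [e]).getLastI = e := by
  rw [List.getLastI_eq_getLast?_getD, List.getLast?_concat]; rfl

lemma pvGetLastI_mem (l : List Nat) (h : l ≠ []) : l.getLastI ∈ l := by
  rw [List.getLastI_eq_getLast?_getD, List.getLast?_eq_some_getLast h]
  exact List.getLast_mem h

lemma pvMkFrom_append (xs : List String) (x : String) (s : Nat) :
    pvMkFrom (xs ++ [x]) s
      = pvMkFrom xs s ++ (if PySem.Str.startswith x "1 " then [s + xs.length] else []) := by
  induction xs generalizing s with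
  | nil => simp [pvMkFrom]
  | cons a t ih =>
      simp only [List.cons_append, pvMkFrom, ih (s + 1), List.length_cons, List.append_assoc]
      ring_nf

lemma pvMarks_eq (xs : List String) (s : Nat) :
    (PySem.List.enumerate xs (s : Int)).filterMap
        (fun p => if PySem.Str.startswith p.2 "1 " then some p.1 else none)
      = (pvMkFrom xs s).map (Nat.cast : Nat → Int) := by
  induction xs generalizing s with
  | nil => simp [PySem.List.enumerate_nil, pvMkFrom]
  | cons a t ih =>
      have ih' := ih (s + 1)
      rw [show ((s + 1 : Nat) : Int) = (s : Int) + 1 by push_cast; ring] at ih'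
      by_cases h : PySem.Str.startswith a "1 " = true
      · have hc : PySem.Chars.startswith a.toList ['1', ' '] = true := by simpa using h
        simpa [PySem.List.enumerate_cons, List.filterMap_cons, pvMkFrom, hc] using ih'
      · have hc : PySem.Chars.startswith a.toList ['1', ' '] = false := by
          simp only [Bool.not_eq_true] at h; simpa using h
        simpa [PySem.List.enumerate_cons, List.filterMap_cons, pvMkFrom, hc] using ih'

lemma pvAdjPairs_append (l : List Nat) (e : Nat) (h : l ≠ []) :
    (l ++ [e]).zip (l ++ [e]).tail = l.zip l.tail ++ [(l.getLastI, e)] := by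
  induction l with
  | nil => exact absurd rfl h
  | cons a t ih =>
      cases t with
      | nil => simp [List.getLastI]
      | cons b t' =>
          have hrec := ih (by simp)
          simp only [List.cons_append, List.tail_cons, List.zip_cons_cons] at hrec ⊢
          rw [hrec,
            show (a :: b :: t').getLastI = (b :: t').getLastI by
              rw [List.getLastI_eq_getLast?_getD, List.getLastI_eq_getLast?_getD,
                List.getLast?_cons_cons]]

lemma pvSlice_stable (xs : List String) (x : String) (a b : Nat)
    (h1 : a ≤ xs.length) (h2 : b ≤ xs.length) :
    (((xs ++ [x]).drop a).take (b - a)) = ((xs.drop a).take (b - a)) := by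
  rw [List.drop_append_of_le_length h1]
  rw [List.take_append_of_le_length (by simp; omega)]

lemma pvChunks_append (xs : List String) (x : String) (mk : List Nat)
    (hb : ∀ i ∈ mk, i ≤ xs.length) :
    pvChunks (xs ++ [x]) mk = pvChunks xs mk := by
  unfold pvChunks
  apply List.map_congr_left
  intro p hp
  exact pvSlice_stable xs x p.1 p.2
    (hb _ (List.of_mem_zip hp).1)
    (hb _ (List.mem_of_mem_tail (List.of_mem_zip hp).2))

lemma pvInv (xs : List String) :
    (∀ i ∈ pvMkFrom xs 0, i < xs.length) ∧
    (pvMkFrom xs 0 = [] → xs.foldl pvStep ([], []) = ([], xs)) ∧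
    (pvMkFrom xs 0 ≠ [] →
       (xs.foldl pvStep ([], [])).1
           = xs.take (pvMkFrom xs 0).headI :: pvChunks xs (pvMkFrom xs 0) ∧
       (xs.foldl pvStep ([], [])).2 = xs.drop (pvMkFrom xs 0).getLastI) := by
  induction xs using List.reverseRecOn with
  | nil => exact ⟨by simp [pvMkFrom], by simp, fun h => absurd rfl h⟩
  | append_singleton xs x ih =>
      obtain ⟨ihb, ihnil, ihcons⟩ := ih
      have hmk := pvMkFrom_append xs x 0
      simp only [Nat.zero_add] at hmk
      have hfold : (xs ++ [x]).foldl pvStep ([], []) = pvStep (xs.foldl pvStep ([], []) ) x :=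
        List.foldl_append
      have hble : ∀ i ∈ pvMkFrom xs 0, i ≤ xs.length := fun i hi => Nat.le_of_lt (ihb i hi)
      by_cases hx : PySem.Str.startswith x "1 " = true
      · -- x is a marker line
        have hxc : PySem.Chars.startswith x.toList ['1', ' '] = true := by simpa using hx
        rw [if_pos hx] at hmk
        by_cases hnil : pvMkFrom xs 0 = []
        · -- first marker
          rw [hmk, hnil]
          refine ⟨by simp, by simp, ?_⟩
          intro _
          rw [hfold, ihnil hnil]
          have e : pvStep ([], xs) x = ([xs], [x]) := by simp [pvStep, hxc]
          rw [e]
          constructor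
          · simp [pvChunks]
          · simp [List.getLastI]
        · obtain ⟨hA1, hA2⟩ := ihcons hnil
          rw [hmk]
          refine ⟨?_, by simp, ?_⟩
          · intro i hi
            rcases List.mem_append.1 hi with hi | hi
            · have := ihb i hi; simp; omega
            · simp at hi; simp [hi]
          intro _
          rw [hfold]
          have hhd : (pvMkFrom xs 0).headI ≤ xs.length := hble _ (pvHeadI_mem _ hnil)
          have hl : (pvMkFrom xs 0).getLastI ≤ xs.length := hble _ (pvGetLastI_mem _ hnil)
          have hchunks : pvChunks (xs ++ [x]) (pvMkFrom xs 0 ++ [xs.length])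
              = pvChunks xs (pvMkFrom xs 0) ++ [xs.drop (pvMkFrom xs 0).getLastI] := by
            unfold pvChunks
            rw [pvAdjPairs_append _ _ hnil, List.map_append]
            congr 1
            · apply List.map_congr_left
              intro p hp
              exact pvSlice_stable xs x p.1 p.2
                (hble _ (List.of_mem_zip hp).1)
                (hble _ (List.mem_of_mem_tail (List.of_mem_zip hp).2))
            · simp only [List.map_cons, List.map_nil]
              rw [List.drop_append_of_le_length hl]
              have hlen : (xs.drop (pvMkFrom xs 0).getLastI).length
                  = xs.length - (pvMkFrom xs 0).getLastI := by simp
              rw [List.take_append_of_le_length (by omega),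
                List.take_of_length_le (by omega)]
          rw [hchunks, pvGetLastI_concat, pvHeadI_append _ _ hnil]
          have e : pvStep (xs.foldl pvStep ([], [])) x
              = ((xs.foldl pvStep ([], [])).1 ++ [(xs.foldl pvStep ([], [])).2], [x]) := by
            simp [pvStep, hxc]
          rw [e]
          constructor
          · rw [hA1, hA2, List.take_append_of_le_length hhd]
            simp
          · simp
      · -- x is not a marker line
        have hxc : PySem.Chars.startswith x.toList ['1', ' '] = false := by
          simp only [Bool.not_eq_true] at hx; simpa using hx
        rw [if_neg hx, List.append_nil] at hmk
        rw [hmk]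
        by_cases hnil : pvMkFrom xs 0 = []
        · refine ⟨by simp [hnil], ?_, fun h => absurd hnil h⟩
          intro _
          rw [hfold, ihnil hnil]
          simp [pvStep, hxc]
        · obtain ⟨hA1, hA2⟩ := ihcons hnil
          refine ⟨?_, fun hc => absurd hc hnil, ?_⟩
          · intro i hi
            have := ihb i hi; simp; omega
          intro _
          rw [hfold]
          have hhd : (pvMkFrom xs 0).headI ≤ xs.length := hble _ (pvHeadI_mem _ hnil)
          have hl : (pvMkFrom xs 0).getLastI ≤ xs.length := hble _ (pvGetLastI_mem _ hnil)
          have e : pvStep (xs.foldl pvStep ([], [])) x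
              = ((xs.foldl pvStep ([], [])).1, (xs.foldl pvStep ([], [])).2 ++ [x]) := by
            simp [pvStep, hxc]
          rw [e]
          constructor
          · rw [hA1, pvChunks_append xs x _ hble, List.take_append_of_le_length hhd]
          · rw [hA2, List.drop_append_of_le_length hl]

lemma pvA_eq (data : List String) :
    split_lines_to_benchmarks data = pvChunks data (pvMkFrom data 0) := by
  obtain ⟨-, hnil, hcons⟩ := pvInv data
  show (data.foldl pvStep ([], [])).1.tail = _
  by_cases h : pvMkFrom data 0 = []
  · rw [hnil h]; simp [pvChunks, h]
  · rw [(hcons h).1]; simp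

lemma pvB_eq (data : List String) :
    split_lines_to_benchmarks_alt data = pvChunks data (pvMkFrom data 0) := by
  unfold split_lines_to_benchmarks_alt
  have hm : (PySem.List.enumerate data (0 : Int)).filterMap
      (fun p => if PySem.Str.startswith p.2 "1 " then some p.1 else none)
      = (pvMkFrom data 0).map (Nat.cast : Nat → Int) := by
    exact_mod_cast pvMarks_eq data 0
  simp only [hm]
  unfold pvChunks
  rw [← List.map_tail, List.zip_map, List.map_map]
  apply List.map_congr_left
  intro p _
  simp [Function.comp, PySem.List.slice_natCast]

-- ===== VERDICT (by name: the statement is the Claim_ definition above) =====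
theorem split_lines_to_benchmarks_spec : Claim_equal_split_lines_to_benchmarks := by
  intro data _ _
  show _ = _
  rw [pvA_eq, pvB_eq]
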